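-- pv_equiv track=rewrite | github.com/cypghost/A2SV | 2460-apply-operations-to-an-array/2460-apply-operations-to-an-array.py | applyOperations
-- ===== SOURCE A (Python) =====
-- def applyOperations(nums):
--     """
--     :type nums: List[int]
--     :rtype: List[int]
--     """
--     index = 0
--     elements = 0
--
--     while index < len(nums) - 1:
--         if nums[index] == nums[index + 1]:
--             nums[index] = nums[index] * 2
--             nums[index + 1] = 0
--             index += 2
--
--         else:
--             index += 1
--
--     for element in range(len(nums)):
--         if nums[element] != 0:
--             temp = nums[element]
--             nums[element] = nums[elements]
--             nums[elements] = temp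
--             elements += 1
--
--     return nums
-- ===== SOURCE B (Python) =====
-- def applyOperations(nums):
--     # Phase 1: rebuild the doubled sequence into a fresh list (no in-place writes),
--     # consuming two elements at a time when a pair is equal.
--     res = []
--     i = 0
--     n = len(nums)
--     while i < n:
--         if i + 1 < n and nums[i] == nums[i + 1]:
--             res.append(nums[i] * 2)
--             res.append(0)
--             i += 2
--         else:
--             res.append(nums[i])
--             i += 1
--     # Phase 2: stable compaction by filter-then-pad instead of swap-based two pointers.
--     vals = [x for x in res if x != 0]
--     nums[:] = vals + [0] * (len(nums) - len(vals))
--     return nums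
-- ===== Notes on version B (the rewrite author's own statement) =====
-- stated objective: simpler
-- what changed: A mutates the list in place twice (an index-jumping doubling pass writing zeros into the array, then a two-pointer swap compaction); B rebuilds the doubled sequence into a fresh list consuming equal pairs, then moves zeros to the end by filtering the non-zeros and padding with zeros.
import Mathlib
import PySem

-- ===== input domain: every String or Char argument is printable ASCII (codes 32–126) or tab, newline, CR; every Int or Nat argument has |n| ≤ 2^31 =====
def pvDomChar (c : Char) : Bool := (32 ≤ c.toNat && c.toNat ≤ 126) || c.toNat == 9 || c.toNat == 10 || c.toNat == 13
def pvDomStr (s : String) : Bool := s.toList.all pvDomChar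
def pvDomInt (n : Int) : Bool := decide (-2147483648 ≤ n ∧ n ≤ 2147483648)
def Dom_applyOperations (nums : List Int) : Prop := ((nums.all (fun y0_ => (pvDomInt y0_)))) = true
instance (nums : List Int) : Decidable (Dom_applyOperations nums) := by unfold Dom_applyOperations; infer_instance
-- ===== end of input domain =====

-- B replaces A's two in-place passes (index-jumping doubling writes + two-pointer swap
-- compaction) by rebuilding the doubled sequence into a fresh list and then filter-then-pad;
-- objective: simpler. Both Pythons mutate `nums` identically; the proof is about the return value.


-- ===== PORT A =====
-- A, phase 1: the in-place doubling scan (`while index < len(nums) - 1`), indices always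
-- in range so `nums[index]` is ported as `getD _ 0`.
def loopA1 (nums : List Int) (index : Nat) : List Int :=
  if index < nums.length - 1 then
    if nums.getD index 0 = nums.getD (index + 1) 0 then
      loopA1 ((nums.set index (nums.getD index 0 * 2)).set (index + 1) 0) (index + 2)
    else
      loopA1 nums (index + 1)
  else nums
termination_by nums.length - index
decreasing_by all_goals simp_all; omega

-- A, phase 2: `for element in range(len(nums))` with the two-pointer swap.
def loopA2 (nums : List Int) (element elements : Nat) : List Int :=
  if element < nums.length then
    if nums.getD element 0 ≠ 0 then
      let temp := nums.getD element 0
      loopA2 ((nums.set element (nums.getD elements 0)).set elements temp) (element + 1) (elements + 1)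
    else
      loopA2 nums (element + 1) elements
  else nums
termination_by nums.length - element
decreasing_by all_goals simp_all; omega

def applyOperations (nums : List Int) : List Int :=
  loopA2 (loopA1 nums 0) 0 0

-- ===== PORT B =====
-- B, phase 1: rebuild the doubled sequence into a fresh accumulator `res`.
def loopB1 (nums : List Int) (i : Nat) (res : List Int) : List Int :=
  if i < nums.length then
    if i + 1 < nums.length ∧ nums.getD i 0 = nums.getD (i + 1) 0 then
      loopB1 nums (i + 2) (res ++ [nums.getD i 0 * 2, 0])
    else
      loopB1 nums (i + 1) (res ++ [nums.getD i 0])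
  else res
termination_by nums.length - i

-- B, phase 2: filter the non-zeros, pad with zeros to the original length.
def applyOperations_alt (nums : List Int) : List Int :=
  let res := loopB1 nums 0 []
  let vals := res.filter (fun x => x ≠ 0)
  vals ++ List.replicate (nums.length - vals.length) 0

-- ===== PRECONDITION & SPEC =====
def Spec_applyOperations (nums : List Int) (out : List Int) : Prop := out = applyOperations_alt nums
instance (nums : List Int) (out : List Int) : Decidable (Spec_applyOperations nums out) := by unfold Spec_applyOperations; infer_instance

-- ===== CLAIM (what is proved, stated in full; the proofs are below) =====
def Claim_equal_applyOperations : Prop := ∀ (nums : List Int), Dom_applyOperations nums → Spec_applyOperations nums (applyOperations nums)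

-- ===== LEMMAS AND PROOFS =====

-- Reference form of the doubling pass: structural recursion consuming equal pairs.
def ph1 : List Int → List Int
  | [] => []
  | [x] => [x]
  | x :: y :: rest => if x = y then x * 2 :: 0 :: ph1 rest else x :: ph1 (y :: rest)

theorem ph1_short (l : List Int) (h : l.length ≤ 1) : ph1 l = l := by
  match l, h with
  | [], _ => rfl
  | [x], _ => rfl

theorem ph1_length (l : List Int) : (ph1 l).length = l.length := by
  fun_induction ph1 l <;> simp_all

-- A's phase 1 computes take-prefix ++ ph1-of-suffix.
theorem loopA1_eq (nums : List Int) (index : Nat) :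
    loopA1 nums index = nums.take index ++ ph1 (nums.drop index) := by
  fun_induction loopA1 nums index with
  | case1 nums index hlt heq ih =>
    have h1 : index + 1 < nums.length := by omega
    have h0 : index < nums.length := by omega
    -- decompose nums at position index
    have hd : nums.drop index = nums[index] :: nums[index + 1] :: nums.drop (index + 2) := by
      rw [List.drop_eq_getElem_cons h0, List.drop_eq_getElem_cons h1]
    have hgd0 : nums.getD index 0 = nums[index] := List.getD_eq_getElem _ _ h0
    have hgd1 : nums.getD (index + 1) 0 = nums[index + 1] := List.getD_eq_getElem _ _ h1
    set v := nums.getD index 0 * 2 with hv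
    set nums' := (nums.set index v).set (index + 1) 0 with hn'
    have hlen' : nums'.length = nums.length := by simp [hn']
    -- drop of nums' beyond both set positions
    have hdrop' : nums'.drop (index + 2) = nums.drop (index + 2) := by
      simp [hn', List.drop_set]
    -- take of nums' : prefix unchanged then the two written values
    have ht2 : nums.take (index + 2) = nums.take index ++ [nums[index], nums[index + 1]] := by
      rw [show index + 2 = index + 2 from rfl, List.take_add, hd]
      simp [List.take]
    have hlen_t : (nums.take index).length = index := by simp; omega
    have htake' : nums'.take (index + 2) = nums.take index ++ [v, 0] := by
      rw [hn', List.take_set, List.take_set, ht2]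
      simp [List.set_append, hlen_t]
    rw [ih, hdrop', htake', hd]
    have : ph1 (nums[index] :: nums[index + 1] :: nums.drop (index + 2))
        = v :: 0 :: ph1 (nums.drop (index + 2)) := by
      rw [ph1]
      rw [hgd0, hgd1] at heq
      simp [heq, hv, hgd0, List.getElem?_eq_getElem h0]
    rw [this]
    simp
  | case2 nums index hlt hne ih =>
    have h1 : index + 1 < nums.length := by omega
    have h0 : index < nums.length := by omega
    have hd : nums.drop index = nums[index] :: nums.drop (index + 1) := List.drop_eq_getElem_cons h0
    have hd1 : nums.drop (index + 1) = nums[index + 1] :: nums.drop (index + 2) := List.drop_eq_getElem_cons h1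
    have htk : nums.take (index + 1) = nums.take index ++ [nums[index]] := by
      rw [List.take_succ]; simp [List.getElem?_eq_getElem h0]
    rw [ih, htk, hd, hd1, ph1]
    have hne' : ¬ nums[index] = nums[index + 1] := by
      rwa [List.getD_eq_getElem _ _ h0, List.getD_eq_getElem _ _ h1] at hne
    simp only [hne', if_false, ← hd1]
    rw [List.append_assoc]
    rfl
  | case3 nums index hge =>
    have : (nums.drop index).length ≤ 1 := by simp; omega
    rw [ph1_short _ this, List.take_append_drop]

-- B's phase 1 computes res ++ ph1-of-suffix.
theorem loopB1_eq (nums : List Int) (i : Nat) (res : List Int) :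
    loopB1 nums i res = res ++ ph1 (nums.drop i) := by
  fun_induction loopB1 nums i res with
  | case1 i res hlt hp ih =>
    obtain ⟨h1, heq⟩ := hp
    have h0 : i < nums.length := hlt
    have hd : nums.drop i = nums[i] :: nums[i + 1] :: nums.drop (i + 2) := by
      rw [List.drop_eq_getElem_cons h0, List.drop_eq_getElem_cons h1]
    rw [ih, hd, ph1]
    rw [List.getD_eq_getElem _ _ h0, List.getD_eq_getElem _ _ h1] at heq
    simp [heq, List.getElem?_eq_getElem h0, List.getElem?_eq_getElem h1]
  | case2 i res hlt hp ih =>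
    have h0 : i < nums.length := hlt
    have hd : nums.drop i = nums[i] :: nums.drop (i + 1) := List.drop_eq_getElem_cons h0
    rw [ih, hd]
    by_cases h1 : i + 1 < nums.length
    · have heq' : ¬ nums[i] = nums[i + 1] := by
        intro h
        exact hp ⟨h1, by rw [List.getD_eq_getElem _ _ h0, List.getD_eq_getElem _ _ h1, h]⟩
      have hd1 : nums.drop (i + 1) = nums[i + 1] :: nums.drop (i + 2) := List.drop_eq_getElem_cons h1
      rw [hd1, ph1]
      simp [heq', ← hd1, List.getElem?_eq_getElem h0]
    · have : nums.drop (i + 1) = [] := by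
        apply List.drop_eq_nil_of_le; omega
      rw [this, ph1]
      simp [ph1, List.getElem?_eq_getElem h0]
  | case3 i res hge =>
    have : nums.drop i = [] := List.drop_eq_nil_of_le (by omega)
    simp [this, ph1]

-- a list all of whose entries from position m on are zero is its m-prefix padded with zeros
theorem zeros_suffix (l : List Int) (m : Nat)
    (h : ∀ k, m ≤ k → k < l.length → l.getD k 0 = 0) :
    l = l.take m ++ List.replicate (l.length - m) 0 := by
  induction l generalizing m with
  | nil => simp
  | cons x xs ih =>
    cases m with
    | zero =>
      have hx : x = 0 := by
        have := h 0 (by omega) (by simp)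
        simpa using this
      have := ih 0 (fun k hk1 hk2 => by
        have := h (k + 1) (by omega) (by simp; omega)
        simpa using this)
      simp only [List.take_zero, List.nil_append] at this ⊢
      rw [hx, List.length_cons]
      rw [Nat.sub_zero] at this ⊢
      rw [List.replicate_succ]
      exact congrArg (0 :: ·) this
    | succ m =>
      have := ih m (fun k hk1 hk2 => by
        have := h (k + 1) (by omega) (by simp; omega)
        simpa using this)
      simp only [List.take_succ_cons, List.cons_append, List.length_cons]
      rw [Nat.succ_sub_succ]
      exact congrArg (x :: ·) this

-- A's phase 2: swap compaction = prefix ++ non-zeros of suffix ++ zero padding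
theorem loopA2_eq (nums : List Int) (element elements : Nat)
    (hle : elements ≤ element)
    (hz : ∀ k, elements ≤ k → k < element → nums.getD k 0 = 0) :
    loopA2 nums element elements =
      nums.take elements ++ (nums.drop element).filter (fun x => x ≠ 0) ++
        List.replicate (nums.length - (elements + ((nums.drop element).filter (fun x => x ≠ 0)).length)) 0 := by
  fun_induction loopA2 nums element elements with
  | case1 nums element elements hlt hnz tmp ih =>
    have h0 : element < nums.length := hlt
    have ha : nums.getD element 0 = nums[element] := List.getD_eq_getElem _ _ h0
    set a := nums.getD element 0 with hadef
    have hd : nums.drop element = a :: nums.drop (element + 1) := by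
      rw [List.drop_eq_getElem_cons h0, ha]
    set nums' := (nums.set element (nums.getD elements 0)).set elements a with hn'
    have hlen' : nums'.length = nums.length := by simp [hn']
    have hel : elements < nums.length := by omega
    -- nums' agrees with nums above element, and its (elements) entry is a
    have hdrop' : nums'.drop (element + 1) = nums.drop (element + 1) := by
      simp only [hn', List.drop_set]
      split_ifs <;> first | rfl | omega
    have htake' : nums'.take (elements + 1) = nums.take elements ++ [a] := by
      apply List.ext_getElem
      · simp [hlen']; omega
      · intro k hk1 hk2
        simp only [hn', List.getElem_take, List.getElem_set]
        by_cases hk : k < elements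
        · rw [List.getElem_append_left (by simp; omega)]
          simp only [List.getElem_take]
          split_ifs with h1 h2
          · omega
          · -- k = element case: impossible since k < elements ≤ element… unless elements = element
            omega
          · rfl
        · have hk' : k = elements := by simp [hlen'] at hk1; omega
          subst hk'
          simp [List.getElem_append_right, List.length_take, Nat.min_eq_left hel.le]
    have hznew : ∀ k, elements + 1 ≤ k → k < element + 1 → nums'.getD k 0 = 0 := by
      intro k hk1 hk2
      have hkl : k < nums.length := by omega
      rw [List.getD_eq_getElem _ _ (by omega : k < nums'.length)]
      simp only [hn', List.getElem_set]
      split_ifs with h1 h2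
      · omega
      · -- k = element : nums[elements] was written there; it is 0 unless elements = element
        have hlt2 : elements < element := by omega
        exact hz elements (le_refl _) hlt2
      · -- untouched position, elements+1 ≤ k < element ≤ element+1, k ≠ element
        have hk3 : k < element := by omega
        have := hz k (by omega) hk3
        rwa [List.getD_eq_getElem _ _ hkl] at this
    rw [ih (by omega) hznew, htake', hdrop', hlen', hd]
    have hane : a ≠ 0 := hnz
    simp only [List.filter_cons, ne_eq, hane, not_false_eq_true, decide_true, if_true,
      List.length_cons, List.append_assoc, List.singleton_append, List.cons_append]
    simp only [List.nil_append]
    have hcnt : nums.length - (elements + 1 + (List.filter (fun x => decide ¬x = 0) (List.drop (element + 1) nums)).length)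
        = nums.length - (elements + ((List.filter (fun x => decide ¬x = 0) (List.drop (element + 1) nums)).length + 1)) := by omega
    rw [hcnt]
  | case2 nums element elements hlt hnz ih =>
    have h0 : element < nums.length := hlt
    have ha : nums.getD element 0 = nums[element] := List.getD_eq_getElem _ _ h0
    have haz : nums[element] = (0 : Int) := by
      by_contra h; exact hnz (by rwa [ha])
    have hd : nums.drop element = 0 :: nums.drop (element + 1) := by
      rw [List.drop_eq_getElem_cons h0, haz]
    have hznew : ∀ k, elements ≤ k → k < element + 1 → nums.getD k 0 = 0 := by
      intro k hk1 hk2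
      by_cases hk : k < element
      · exact hz k hk1 hk
      · have : k = element := by omega
        subst this; rw [ha, haz]
    rw [ih (by omega) hznew, hd]
    simp
  | case3 nums element elements hge =>
    have hdrop : nums.drop element = [] := List.drop_eq_nil_of_le (by omega)
    rw [hdrop]
    simp only [List.filter_nil, List.append_nil, List.length_nil, Nat.add_zero]
    exact zeros_suffix nums elements (fun k hk1 hk2 => hz k hk1 (by omega))

-- ===== VERDICT (by name: the statement is the Claim_ definition above) =====
theorem applyOperations_spec : Claim_equal_applyOperations := by
  intro nums _
  unfold Spec_applyOperations applyOperations applyOperations_alt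
  rw [loopA1_eq, loopB1_eq]
  simp only [List.take_zero, List.nil_append, List.drop_zero]
  rw [loopA2_eq (ph1 nums) 0 0 (le_refl 0) (by omega)]
  simp only [List.take_zero, List.nil_append, List.drop_zero, Nat.zero_add]
  rw [ph1_length]
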